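-- pv_equiv track=rewrite | github.com/tomo920/QCArchitectrue-QOMDP | quantumcircuit/qc.py | enum_toffoli_bn
-- ===== SOURCE A (Python) =====
-- import itertools
-- import copy
--
-- def enum_toffoli_bn(control_bn, target_bn):
--     '''
--     Enumerate all combinations of control bits and target bit of toffoli gate.
--
--     Args
--     ----------
--     control_bn: list
--         List of index of control bit.
--     target_bn: list
--         List of index of target bit.
--
--     Returns
--     ----------
--     List of combinations of two control bits and target bit.
--     '''
--
--     if len(target_bn) == 1 and len(control_bn) == 2:
--         return [[[control_bn[0], control_bn[1], target_bn[0]]]]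
--     else:
--         inds = []
--         for c_t in itertools.product(itertools.combinations(control_bn, 2), target_bn):
--             target_bn_copy = copy.copy(target_bn)
--             target_bn_copy.remove(c_t[1])
--             control_bn_copy = copy.copy(control_bn)
--             control_bn_copy.remove(c_t[0][0])
--             control_bn_copy.remove(c_t[0][1])
--             inds_ =  enum_toffoli_bn(control_bn_copy, target_bn_copy)
--             for ind in inds_:
--                 ind.extend([[c_t[0][0], c_t[0][1], c_t[1]]])
--                 inds.extend([ind])
--         return inds
-- ===== SOURCE B (Python) =====
-- import itertools
--
-- def enum_toffoli_bn(control_bn, target_bn):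
--     # Iterative level-by-level expansion (worklist) instead of recursion:
--     # each state is (remaining controls, remaining targets, suffix of triples).
--     # reaching the base shape (2 controls, 1 target) needs exactly 2 controls per target
--     if len(control_bn) != 2 * len(target_bn):
--         return []
--     frontier = [(control_bn, target_bn, [])]
--     for _ in range(len(target_bn) - 1):
--         new_frontier = []
--         for C, T, suffix in frontier:
--             for (a, b), t in itertools.product(itertools.combinations(C, 2), T):
--                 C2 = list(C)
--                 C2.remove(a)
--                 C2.remove(b)
--                 T2 = list(T)
--                 T2.remove(t)
--                 new_frontier.append((C2, T2, [[a, b, t]] + suffix))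
--         frontier = new_frontier
--     return [[[C[0], C[1], T[0]]] + suffix
--             for C, T, suffix in frontier
--             if len(T) == 1 and len(C) == 2]
-- ===== Notes on version B (the rewrite author's own statement) =====
-- stated objective: alternative
-- what changed: Replaces A's recursion with an iterative level-by-level worklist: each state carries the remaining control/target bits and the suffix of triples chosen so far, one expansion level per target consumed, then base-shaped states are emitted in order.
import Mathlib
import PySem

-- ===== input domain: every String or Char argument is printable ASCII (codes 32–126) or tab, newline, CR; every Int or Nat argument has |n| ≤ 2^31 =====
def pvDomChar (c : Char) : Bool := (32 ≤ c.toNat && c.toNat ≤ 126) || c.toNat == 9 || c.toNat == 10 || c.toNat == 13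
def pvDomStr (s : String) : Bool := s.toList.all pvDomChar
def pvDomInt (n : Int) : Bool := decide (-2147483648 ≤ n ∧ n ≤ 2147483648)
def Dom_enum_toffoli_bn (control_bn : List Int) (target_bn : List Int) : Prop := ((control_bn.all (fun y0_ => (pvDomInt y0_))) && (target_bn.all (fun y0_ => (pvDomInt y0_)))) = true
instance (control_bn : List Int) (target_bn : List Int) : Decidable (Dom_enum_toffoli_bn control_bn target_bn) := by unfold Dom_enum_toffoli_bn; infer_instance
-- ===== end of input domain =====

-- B replaces A's recursion by an iterative level-by-level worklist expansion (same values, same order); objective: alternative decomposition.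

-- ===== PORT A =====
-- itertools.combinations(xs, 2), in itertools order (values, index pairs i < j)
def pairs2 : List Int → List (Int × Int)
  | [] => []
  | x :: xs => xs.map (fun y => (x, y)) ++ pairs2 xs

-- used by A's termination proof: list.remove of a member shortens the list by one
theorem remove?_getD_length (T : List Int) (t : Int) (ht : t ∈ T) :
    ((PySem.List.remove? T t).getD T).length + 1 = T.length := by
  rw [PySem.List.remove?_eq_some_erase T t ht]
  have h1 : 1 ≤ T.length := List.length_pos_of_mem ht
  simp [ht]
  omega

-- literal transliteration of A; `.remove` never raises here (the removed values are members),
-- so `.getD` defaults are unreachable; base-case indexing is in range by the guard.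
def enum_toffoli_bn (control_bn : List Int) (target_bn : List Int) : List (List (List Int)) :=
  if target_bn.length = 1 ∧ control_bn.length = 2 then
    [[[(PySem.List.pyGet? control_bn 0).getD 0, (PySem.List.pyGet? control_bn 1).getD 0,
       (PySem.List.pyGet? target_bn 0).getD 0]]]
  else
    (pairs2 control_bn).foldl (fun inds ab =>
      target_bn.attach.foldl (fun inds t =>
        let target_bn_copy := (PySem.List.remove? target_bn t.1).getD target_bn
        let control_bn_copy := (PySem.List.remove? control_bn ab.1).getD control_bn
        let control_bn_copy2 := (PySem.List.remove? control_bn_copy ab.2).getD control_bn_copy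
        let inds_ := enum_toffoli_bn control_bn_copy2 target_bn_copy
        inds ++ inds_.map (fun ind => ind ++ [[ab.1, ab.2, t.1]])) inds) []
termination_by target_bn.length
decreasing_by
  have := remove?_getD_length target_bn t.1 t.2
  omega

-- ===== PORT B =====
-- one worklist expansion level: every state spawns all (pair, target) children
def stepFrontier (F : List (List Int × List Int × List (List Int))) :
    List (List Int × List Int × List (List Int)) :=
  F.flatMap (fun st =>
    (pairs2 st.1).flatMap (fun ab =>
      st.2.1.map (fun t =>
        let C1 := (PySem.List.remove? st.1 ab.1).getD st.1
        let C2 := (PySem.List.remove? C1 ab.2).getD C1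
        let T2 := (PySem.List.remove? st.2.1 t).getD st.2.1
        (C2, T2, [ab.1, ab.2, t] :: st.2.2))))

-- final comprehension: emit base-shaped states
def emitFrontier (F : List (List Int × List Int × List (List Int))) : List (List (List Int)) :=
  F.filterMap (fun st =>
    if st.2.1.length = 1 ∧ st.1.length = 2 then
      some ([[(PySem.List.pyGet? st.1 0).getD 0, (PySem.List.pyGet? st.1 1).getD 0,
              (PySem.List.pyGet? st.2.1 0).getD 0]] ++ st.2.2)
    else none)

def enum_toffoli_bn_alt (control_bn : List Int) (target_bn : List Int) : List (List (List Int)) :=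
  if control_bn.length ≠ 2 * target_bn.length then []
  else emitFrontier ((List.range (target_bn.length - 1)).foldl
    (fun F _ => stepFrontier F) [(control_bn, target_bn, [])])

-- ===== PRECONDITION & SPEC =====
def Spec_enum_toffoli_bn (control_bn : List Int) (target_bn : List Int) (out : List (List (List Int))) : Prop := out = enum_toffoli_bn_alt control_bn target_bn
instance (control_bn : List Int) (target_bn : List Int) (out : List (List (List Int))) : Decidable (Spec_enum_toffoli_bn control_bn target_bn out) := by unfold Spec_enum_toffoli_bn; infer_instance

-- ===== CLAIM (what is proved, stated in full; the proofs are below) =====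
def Claim_equal_enum_toffoli_bn : Prop := ∀ (control_bn : List Int) (target_bn : List Int), Dom_enum_toffoli_bn control_bn target_bn → Spec_enum_toffoli_bn control_bn target_bn (enum_toffoli_bn control_bn target_bn)

-- ===== LEMMAS AND PROOFS =====

-- the value a worklist state contributes to the final answer
def stVal (st : List Int × List Int × List (List Int)) : List (List (List Int)) :=
  (enum_toffoli_bn st.1 st.2.1).map (· ++ st.2.2)

theorem A_unfold (C T : List Int) (h : ¬ (T.length = 1 ∧ C.length = 2)) :
    enum_toffoli_bn C T =
      (pairs2 C).flatMap (fun ab =>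
        T.flatMap (fun t =>
          (enum_toffoli_bn
              ((PySem.List.remove?
                  ((PySem.List.remove? C ab.1).getD C) ab.2).getD
                    ((PySem.List.remove? C ab.1).getD C))
              ((PySem.List.remove? T t).getD T)).map (fun ind => ind ++ [[ab.1, ab.2, t]]))) := by
  rw [enum_toffoli_bn]
  rw [if_neg h]
  simp only [PySem.List.foldl_append_eq_flatMap, List.nil_append]
  simp [List.flatMap_subtype]

theorem A_nil_target (C : List Int) : enum_toffoli_bn C [] = [] := by
  rw [A_unfold C [] (by simp)]
  simp

theorem A_one_target_bad (C : List Int) (t : Int) (hC : C.length ≠ 2) :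
    enum_toffoli_bn C [t] = [] := by
  rw [A_unfold C [t] (by simp [hC])]
  simp [A_nil_target]

theorem step_invariant (F : List (List Int × List Int × List (List Int))) (k : Nat)
    (h : ∀ st ∈ F, st.2.1.length = k + 2) :
    ∀ st' ∈ stepFrontier F, st'.2.1.length = k + 1 := by
  intro st' hst'
  simp only [stepFrontier, List.mem_flatMap, List.mem_map] at hst'
  obtain ⟨st, hst, ab, hab, t, ht, rfl⟩ := hst'
  have := remove?_getD_length st.2.1 t ht
  have := h st hst
  simp only []
  omega

theorem foldl_const_iterate (l : List Nat) (F : List (List Int × List Int × List (List Int))) :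
    l.foldl (fun F _ => stepFrontier F) F = stepFrontier^[l.length] F := by
  induction l generalizing F with
  | nil => rfl
  | cons x xs ih => simp [List.foldl_cons, ih, Function.iterate_succ_apply]

theorem mem_pairs2 (C : List Int) :
    ∀ ab ∈ pairs2 C, ab.1 ∈ C ∧ ab.2 ∈ ((PySem.List.remove? C ab.1).getD C) := by
  induction C with
  | nil => simp [pairs2]
  | cons x xs ih =>
    intro ab hab
    simp only [pairs2, List.mem_append, List.mem_map] at hab
    rcases hab with ⟨y, hy, rfl⟩ | h
    · refine ⟨by simp, ?_⟩
      rw [PySem.List.remove?_cons_self]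
      simpa using hy
    · obtain ⟨h1, h2⟩ := ih ab h
      refine ⟨by simp [h1], ?_⟩
      by_cases hx : x = ab.1
      · subst hx
        rw [PySem.List.remove?_cons_self]
        simp only [Option.getD_some]
        rw [PySem.List.remove?_eq_some_erase xs ab.1 h1] at h2
        exact List.erase_subset (Option.getD_some ▸ h2)
      · rw [PySem.List.remove?_cons_of_ne xs hx]
        rw [PySem.List.remove?_eq_some_erase xs ab.1 h1] at h2 ⊢
        simp only [Option.map_some, Option.getD_some] at h2 ⊢
        simp [h2]

theorem A_empty_of_mismatch (n : Nat) :
    ∀ (T C : List Int), T.length = n → C.length ≠ 2 * n → enum_toffoli_bn C T = [] := by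
  induction n with
  | zero =>
    intro T C hT _
    rw [List.eq_nil_of_length_eq_zero hT]
    exact A_nil_target C
  | succ n ih =>
    intro T C hT h
    rw [A_unfold C T (by intro ⟨h1, h2⟩; omega)]
    rw [List.flatMap_eq_nil_iff]
    intro ab hab
    rw [List.flatMap_eq_nil_iff]
    intro t ht
    obtain ⟨h1, h2⟩ := mem_pairs2 C ab hab
    have e1 := remove?_getD_length C ab.1 h1
    have e2 := remove?_getD_length _ ab.2 h2
    have e3 := remove?_getD_length T t ht
    rw [ih _ _ (by omega) (by omega)]
    simp

theorem emit_eq_flatMap_stVal (k : Nat) :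
    ∀ (F : List (List Int × List Int × List (List Int))),
      (∀ st ∈ F, st.2.1.length = k + 1) →
      emitFrontier (stepFrontier^[k] F) = F.flatMap stVal := by
  induction k with
  | zero =>
    intro F h
    simp only [Function.iterate_zero, id]
    induction F with
    | nil => simp [emitFrontier]
    | cons st F ihF =>
      have h1 : st.2.1.length = 1 := h st (by simp)
      obtain ⟨t, hT⟩ := List.length_eq_one_iff.mp h1
      rw [List.flatMap_cons, emitFrontier, List.filterMap_cons]
      rw [← emitFrontier]
      rw [ihF (fun s hs => h s (by simp [hs]))]
      by_cases hC : st.1.length = 2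
      · obtain ⟨a, b, hCab⟩ := List.length_eq_two.mp hC
        simp only [h1, hC, and_self, if_pos]
        simp [stVal, hCab, hT, enum_toffoli_bn, PySem.List.pyGet?]
      · simp only [h1, hC, and_false, if_false]
        simp [stVal, hT, A_one_target_bad st.1 t hC]
  | succ k ih =>
    intro F h
    rw [Function.iterate_succ_apply]
    rw [ih (stepFrontier F) (step_invariant F k h)]
    rw [stepFrontier, List.flatMap_assoc]
    apply List.flatMap_congr ?_
    intro st hst
    have hT : st.2.1.length = k + 2 := h st hst
    rw [List.flatMap_assoc]
    conv_rhs => rw [stVal, A_unfold st.1 st.2.1 (by omega)]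
    rw [List.map_flatMap]
    apply List.flatMap_congr ?_
    intro ab hab
    rw [List.flatMap_map, List.map_flatMap]
    apply List.flatMap_congr ?_
    intro t ht
    simp [stVal, List.map_map, Function.comp]

theorem enum_toffoli_bn_spec : Claim_equal_enum_toffoli_bn := by
  intro C T _
  unfold Spec_enum_toffoli_bn enum_toffoli_bn_alt
  by_cases hm : C.length = 2 * T.length
  case neg =>
    rw [if_pos hm, A_empty_of_mismatch T.length T C rfl hm]
  rw [if_neg (by omega)]
  rw [foldl_const_iterate, List.length_range]
  cases hT : T with
  | nil =>
    simp [emitFrontier, A_nil_target]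
  | cons t ts =>
    have : (t :: ts).length - 1 = ts.length := by simp
    rw [this]
    rw [emit_eq_flatMap_stVal ts.length [(C, t :: ts, [])] (by simp)]
    simp [stVal]
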